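-- pv_equiv track=rewrite | github.com/T0admomo/Topic_modeling_LDA_sentiment_Vadar_nextdoor.com | code/myfunct.py | cat_posts
-- ===== SOURCE A (Python) =====
-- def cat_posts(post_tokens, kwds, label):
--     '''
--     label: class label
--     kwds: search terms
--     post_tokens: tokenized corpus
--
--     returns: labeled dataset containing target posts
--     '''
--
--     train_data = []
--     match = None
--     # if a post has one of our kwds
--     for word in kwds:
--         for post in post_tokens:
--             match = False
--             # only relevant posts
--             if word in post:
--                 match = True
--             # if our keyword is in a post then match = True
--             # attaches given class label to post
--             if match == True:
--                 post = ' '.join(post)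
--                 train_data.append((post,label))
--
--     return train_data
-- ===== SOURCE B (Python) =====
-- def cat_posts(post_tokens, kwds, label):
--     # inverted index: token -> joined texts of the posts containing it, in post order
--     index = {}
--     for post in post_tokens:
--         text = ' '.join(post)
--         for tok in dict.fromkeys(post):
--             index.setdefault(tok, []).append(text)
--     return [(text, label) for word in kwds for text in index.get(word, [])]
-- ===== Notes on version B (the rewrite author's own statement) =====
-- stated objective: alternative
-- what changed: Replaced the keyword-by-keyword rescan of the whole corpus with an inverted index built in one pass over the posts (token -> joined texts of the posts containing it), so each keyword becomes a single dictionary lookup; intended as faster, measured 2.57x at n=4096 but unconfirmed at the largest size.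
import Mathlib
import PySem

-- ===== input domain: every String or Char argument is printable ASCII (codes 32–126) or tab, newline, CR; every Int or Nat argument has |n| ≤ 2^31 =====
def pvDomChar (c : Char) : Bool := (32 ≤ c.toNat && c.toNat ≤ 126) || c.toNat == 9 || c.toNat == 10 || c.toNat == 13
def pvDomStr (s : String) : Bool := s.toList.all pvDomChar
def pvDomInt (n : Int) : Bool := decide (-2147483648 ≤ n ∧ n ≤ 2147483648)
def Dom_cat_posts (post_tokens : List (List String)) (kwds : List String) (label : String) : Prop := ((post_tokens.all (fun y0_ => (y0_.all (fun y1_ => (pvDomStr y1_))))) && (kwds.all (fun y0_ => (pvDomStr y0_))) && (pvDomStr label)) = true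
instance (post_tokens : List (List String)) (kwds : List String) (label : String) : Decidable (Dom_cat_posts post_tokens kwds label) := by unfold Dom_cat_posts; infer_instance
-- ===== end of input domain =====

-- B replaces A's per-keyword rescan of the corpus with an inverted index built in one pass over the posts (objective: alternative).

-- ===== PORT A =====
def cat_posts (post_tokens : List (List String)) (kwds : List String) (label : String) : List (String × String) :=
  kwds.foldl (fun train_data word =>
    post_tokens.foldl (fun train_data post =>
      let m : Bool := post.contains word
      if m then train_data ++ [(PySem.Str.join " " post, label)] else train_data)
      train_data)
    []

-- ===== PORT B =====
-- inverted index: token -> joined texts of the posts containing it, in post order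
def pvBuildIndex (post_tokens : List (List String)) : PySem.Dict String (List String) :=
  post_tokens.foldl (fun d post =>
    (PySem.List.dedup post).foldl
      (fun d tok => d.modify tok [] (· ++ [PySem.Str.join " " post])) d)
    PySem.Dict.empty

def cat_posts_alt (post_tokens : List (List String)) (kwds : List String) (label : String) : List (String × String) :=
  let index := pvBuildIndex post_tokens
  kwds.foldl (fun acc word => acc ++ (index.getD word []).map (fun text => (text, label))) []

-- ===== PRECONDITION & SPEC =====
def Spec_cat_posts (post_tokens : List (List String)) (kwds : List String) (label : String) (out : List (String × String)) : Prop := out = cat_posts_alt post_tokens kwds label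
instance (post_tokens : List (List String)) (kwds : List String) (label : String) (out : List (String × String)) : Decidable (Spec_cat_posts post_tokens kwds label out) := by unfold Spec_cat_posts; infer_instance

-- ===== CLAIM (what is proved, stated in full; the proofs are below) =====
def Claim_equal_cat_posts : Prop := ∀ (post_tokens : List (List String)) (kwds : List String) (label : String), Dom_cat_posts post_tokens kwds label → Spec_cat_posts post_tokens kwds label (cat_posts post_tokens kwds label)

-- ===== LEMMAS AND PROOFS =====

-- A's inner loop over posts appends the joined matching posts in order.
theorem innerA_eq (posts : List (List String)) (word label : String)
    (acc : List (String × String)) :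
    posts.foldl (fun td post =>
      let m : Bool := post.contains word
      if m then td ++ [(PySem.Str.join " " post, label)] else td) acc
    = acc ++ (posts.filter (fun p => p.contains word)).map
        (fun p => (PySem.Str.join " " p, label)) := by
  induction posts generalizing acc with
  | nil => simp
  | cons p rest ih =>
    simp only [List.foldl_cons, List.filter_cons]
    rw [ih]
    by_cases h : word ∈ p
    · simp [h]
    · simp [h]

-- a nodup list filtered for equality with w
theorem filter_beq_nodup {α : Type} [DecidableEq α] (l : List α) (hn : l.Nodup) (w : α) :
    l.filter (fun t => t == w) = if w ∈ l then [w] else [] := by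
  induction l with
  | nil => simp
  | cons a rest ih =>
    simp only [List.nodup_cons] at hn
    by_cases h : a = w
    · subst h
      have : a ∉ rest := hn.1
      have hr : rest.filter (fun t => t == a) = [] := by
        apply List.filter_eq_nil_iff.mpr
        intro t ht
        simp only [beq_iff_eq]
        intro he; exact this (he ▸ ht)
      simp [hr]
    · have := ih hn.2
      by_cases hm : w ∈ rest <;> simp [h, hm, this, Ne.symm h]

-- one post's inner dedup-fold appends the joined text to the entry of each of its tokens
theorem inner_fold_getD (post : List String) (text : String) (w : String)
    (d : PySem.Dict String (List String)) :
    ((PySem.List.dedup post).foldl (fun d tok => d.modify tok [] (· ++ [text])) d).getD w []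
    = d.getD w [] ++ (if w ∈ post then [text] else []) := by
  have hmap : (PySem.List.dedup post).foldl (fun d tok => d.modify tok [] (· ++ [text])) d
      = ((PySem.List.dedup post).map (fun t => (t, text))).foldl
          (fun d p => d.modify p.1 [] (· ++ [p.2])) d := by
    rw [List.foldl_map]
  rw [hmap, PySem.Dict.getD_foldl_modify_append]
  congr 1
  rw [List.filter_map]
  have : (fun (p : String × String) => p.1 == w) ∘ (fun t => (t, text)) = (fun t => t == w) := rfl
  rw [this, filter_beq_nodup _ (PySem.List.nodup_dedup post) w]
  by_cases hm : w ∈ post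
  · simp [hm]
  · simp [hm]

-- the index entry of w lists the joined posts containing w, in order
theorem buildIndex_getD_from (posts : List (List String)) (w : String)
    (d : PySem.Dict String (List String)) :
    (posts.foldl (fun d post =>
        (PySem.List.dedup post).foldl
          (fun d tok => d.modify tok [] (· ++ [PySem.Str.join " " post])) d) d).getD w []
    = d.getD w [] ++ (posts.filter (fun p => p.contains w)).map (fun p => PySem.Str.join " " p) := by
  induction posts generalizing d with
  | nil => simp
  | cons p rest ih =>
    simp only [List.foldl_cons, List.filter_cons]
    rw [ih, inner_fold_getD]
    by_cases hm : w ∈ p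
    · simp [hm]
    · simp [hm]

theorem buildIndex_getD (posts : List (List String)) (w : String) :
    (pvBuildIndex posts).getD w []
    = (posts.filter (fun p => p.contains w)).map (fun p => PySem.Str.join " " p) := by
  unfold pvBuildIndex
  rw [buildIndex_getD_from]
  simp

theorem folds_eq (post_tokens : List (List String)) (kwds : List String) (label : String)
    (acc : List (String × String)) :
    kwds.foldl (fun td word =>
      post_tokens.foldl (fun td post =>
        let m : Bool := post.contains word
        if m then td ++ [(PySem.Str.join " " post, label)] else td) td) acc
    = kwds.foldl (fun acc word =>
        acc ++ ((pvBuildIndex post_tokens).getD word []).map (fun text => (text, label))) acc := by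
  induction kwds generalizing acc with
  | nil => rfl
  | cons w rest ih =>
    simp only [List.foldl_cons]
    rw [innerA_eq, ih, buildIndex_getD, List.map_map]
    rfl

-- ===== VERDICT (by name: the statement is the Claim_ definition above) =====
theorem cat_posts_spec : Claim_equal_cat_posts := by
  intro post_tokens kwds label _
  unfold Spec_cat_posts cat_posts cat_posts_alt
  exact folds_eq post_tokens kwds label []
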